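-- pv_equiv track=rewrite | github.com/wuzengding/TRANSAID | TISTTS_Pair_Analyzer.py | _extract_true_positions
-- ===== SOURCE A (Python) =====
-- from typing import Dict, List, Tuple, Set
--
-- def _extract_true_positions(transcript_data: Dict) -> Tuple[int, int]:
--     """
--     从true_labels中提取真实的TIS和TTS位置
--
--     Args:
--         transcript_data: 转录本数据
--
--     Returns:
--         Tuple[int, int]: (TIS位置, TTS位置)
--     """
--     true_labels = transcript_data['true_labels']
--
--     # 找到连续的TIS (label=0)
--     tis_pos = -1
--     for i in range(len(true_labels)-2):
--         if (true_labels[i] == 0 and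
--             true_labels[i+1] == 0 and
--             true_labels[i+2] == 0):
--             tis_pos = i
--             break
--
--     # 找到连续的TTS (label=1)
--     tts_pos = -1
--     for i in range(len(true_labels)-2):
--         if (true_labels[i] == 1 and
--             true_labels[i+1] == 1 and
--             true_labels[i+2] == 1):
--             tts_pos = i
--             break
--
--     return tis_pos, tts_pos
-- ===== SOURCE B (Python) =====
-- def _extract_true_positions(transcript_data):
--     """Single pass with run-length counters instead of two lookahead scans."""
--     true_labels = transcript_data['true_labels']
--     tis_pos = -1
--     tts_pos = -1
--     prev = None
--     run = 0
--     for i, v in enumerate(true_labels):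
--         if v == prev:
--             run += 1
--         else:
--             prev = v
--             run = 1
--         if run >= 3:
--             if v == 0 and tis_pos == -1:
--                 tis_pos = i - 2
--             elif v == 1 and tts_pos == -1:
--                 tts_pos = i - 2
--     return tis_pos, tts_pos
-- ===== Notes on version B (the rewrite author's own statement) =====
-- stated objective: alternative
-- what changed: Replaces A's two separate index loops with i/i+1/i+2 lookahead by one enumerate pass that maintains a previous-value/run-length counter and records each position the first time a run of 0s or 1s reaches length 3.
import Mathlib
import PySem

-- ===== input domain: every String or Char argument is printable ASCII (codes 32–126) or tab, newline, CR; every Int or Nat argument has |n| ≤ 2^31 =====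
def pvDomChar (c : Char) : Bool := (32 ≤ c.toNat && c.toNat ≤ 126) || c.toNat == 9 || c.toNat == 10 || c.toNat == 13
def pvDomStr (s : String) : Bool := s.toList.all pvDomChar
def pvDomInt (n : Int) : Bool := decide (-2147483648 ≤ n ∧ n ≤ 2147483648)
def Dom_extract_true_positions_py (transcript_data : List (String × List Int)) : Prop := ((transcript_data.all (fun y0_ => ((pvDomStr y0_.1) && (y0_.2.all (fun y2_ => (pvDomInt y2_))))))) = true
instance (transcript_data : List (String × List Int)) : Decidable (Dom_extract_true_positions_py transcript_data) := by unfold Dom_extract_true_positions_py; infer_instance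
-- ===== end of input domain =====

-- B replaces A's two index loops with lookahead by one run-length-counter pass (objective: alternative, same cost).

-- ===== PORT A =====
-- A's loop 'for i in range(len(l)-2): if l[i]==t and l[i+1]==t and l[i+2]==t: pos=i; break'.
-- Indices i, i+1, i+2 are always in range because i < len-2, so List.getD is exact here.
def pvScanA (l : List Int) (t : Int) (n : Nat) (i : Nat) : Int :=
  if _h : i < n then
    if l.getD i 0 = t ∧ l.getD (i+1) 0 = t ∧ l.getD (i+2) 0 = t then (i : Int)
    else pvScanA l t n (i+1)
  else -1
termination_by n - i

def extract_true_positions_py (transcript_data : List (String × List Int)) : Int × Int :=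
  let true_labels := (transcript_data.lookup "true_labels").getD []
  (pvScanA true_labels 0 (true_labels.length - 2) 0,
   pvScanA true_labels 1 (true_labels.length - 2) 0)

-- ===== PORT B =====
-- one step of Source B's loop body: state = ((tis_pos, tts_pos), (prev, run)), input = (i, v)
def pvStepB (st : (Int × Int) × Option Int × Nat) (p : Int × Int) : (Int × Int) × Option Int × Nat :=
  let tis := st.1.1
  let tts := st.1.2
  let pr : Option Int × Nat := if some p.2 = st.2.1 then (st.2.1, st.2.2 + 1) else (some p.2, 1)
  if 3 ≤ pr.2 then
    if p.2 = 0 ∧ tis = -1 then ((p.1 - 2, tts), pr)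
    else if p.2 = 1 ∧ tts = -1 then ((tis, p.1 - 2), pr)
    else ((tis, tts), pr)
  else ((tis, tts), pr)

def extract_true_positions_py_alt (transcript_data : List (String × List Int)) : Int × Int :=
  let true_labels := (transcript_data.lookup "true_labels").getD []
  ((PySem.List.enumerate true_labels 0).foldl pvStepB ((-1, -1), (none, 0))).1

-- ===== PRECONDITION & SPEC =====
-- Pre_ excludes exactly the dicts without key 'true_labels', on which Python A raises KeyError.
def Pre_extract_true_positions_py (transcript_data : List (String × List Int)) : Prop :=
  (transcript_data.lookup "true_labels").isSome
instance (transcript_data : List (String × List Int)) : Decidable (Pre_extract_true_positions_py transcript_data) := by unfold Pre_extract_true_positions_py; infer_instance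

def pvWitness_extract_true_positions_py : (List (String × List Int)) :=
  [("true_labels", [2, 0, 0, 0, 1, 1, 1])]

def Spec_extract_true_positions_py (transcript_data : List (String × List Int)) (out : Int × Int) : Prop := out = extract_true_positions_py_alt transcript_data
instance (transcript_data : List (String × List Int)) (out : Int × Int) : Decidable (Spec_extract_true_positions_py transcript_data out) := by unfold Spec_extract_true_positions_py; infer_instance

-- ===== CLAIM (what is proved, stated in full; the proofs are below) =====
def Claim_equal_extract_true_positions_py : Prop := ∀ (transcript_data : List (String × List Int)), Dom_extract_true_positions_py transcript_data → Pre_extract_true_positions_py transcript_data → Spec_extract_true_positions_py transcript_data (extract_true_positions_py transcript_data)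

-- ===== LEMMAS AND PROOFS =====

-- index (as Option Nat) of the first run of three consecutive t's
def firstT? (t : Int) : List Int → Option Nat
  | a :: b :: c :: r =>
      if a = t ∧ b = t ∧ c = t then some 0 else (firstT? t (b :: c :: r)).map (· + 1)
  | _ => none

def optInt : Option Nat → Int := fun o => o.elim (-1) (fun j => (j : Int))

lemma firstT?_short (t : Int) (l : List Int) (h : l.length ≤ 2) : firstT? t l = none := by
  match l with
  | [] => rfl
  | [_] => rfl
  | [_, _] => rfl
  | _ :: _ :: _ :: _ => simp at h

-- A-side: the scan from index i finds the first triple in l.drop i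
lemma pvScanA_eq (l : List Int) (t : Int) :
    ∀ i, pvScanA l t (l.length - 2) i = optInt ((firstT? t (l.drop i)).map (· + i)) := by
  intro i
  fun_induction pvScanA l t (l.length - 2) i with
  | case1 i h htrip =>
      have h2 : i + 2 < l.length := by omega
      have hdrop : l.drop i = l[i] :: l[i+1] :: l[i+2] :: l.drop (i+3) := by
        rw [List.drop_eq_getElem_cons (by omega), List.drop_eq_getElem_cons (by omega),
            List.drop_eq_getElem_cons (by omega)]
      rw [hdrop]
      have : l[i] = t ∧ l[i+1] = t ∧ l[i+2] = t := by
        obtain ⟨h0, h1, h2'⟩ := htrip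
        rw [List.getD_eq_getElem l 0 (by omega)] at h0
        rw [List.getD_eq_getElem l 0 (by omega)] at h1
        rw [List.getD_eq_getElem l 0 (by omega)] at h2'
        exact ⟨h0, h1, h2'⟩
      simp [firstT?, this, optInt]
  | case2 i h htrip ih =>
      have h2 : i + 2 < l.length := by omega
      have hdrop : l.drop i = l[i] :: l[i+1] :: l[i+2] :: l.drop (i+3) := by
        rw [List.drop_eq_getElem_cons (by omega), List.drop_eq_getElem_cons (by omega),
            List.drop_eq_getElem_cons (by omega)]
      have hdrop1 : l.drop (i+1) = l[i+1] :: l[i+2] :: l.drop (i+3) := by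
        rw [List.drop_eq_getElem_cons (by omega), List.drop_eq_getElem_cons (by omega)]
      have hfalse : ¬ (l[i] = t ∧ l[i+1] = t ∧ l[i+2] = t) := by
        intro ⟨h0, h1, h2'⟩
        exact htrip ⟨by rw [List.getD_eq_getElem l 0 (by omega)]; exact h0,
                     by rw [List.getD_eq_getElem l 0 (by omega)]; exact h1,
                     by rw [List.getD_eq_getElem l 0 (by omega)]; exact h2'⟩
      rw [ih, hdrop]
      rw [show (firstT? t (l[i] :: l[i+1] :: l[i+2] :: l.drop (i+3))) =
            (firstT? t (l[i+1] :: l[i+2] :: l.drop (i+3))).map (· + 1) by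
            simp [firstT?, hfalse]]
      rw [← hdrop1]
      cases firstT? t (l.drop (i+1)) with
      | none => simp
      | some j => simp [optInt]; omega
  | case3 i h =>
      have : (l.drop i).length ≤ 2 := by simp; omega
      rw [firstT?_short t _ this]
      simp [optInt]

lemma extractA_eq (l : List Int) (td : List (String × List Int))
    (h : td.lookup "true_labels" = some l) :
    extract_true_positions_py td = (optInt (firstT? 0 l), optInt (firstT? 1 l)) := by
  show (pvScanA _ 0 _ 0, pvScanA _ 1 _ 0) = _
  rw [h]
  simp only [Option.getD_some]
  rw [pvScanA_eq l 0 0, pvScanA_eq l 1 0]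
  simp

-- the (prev, run) component of B's loop state
def pvTrail (l : List Int) : Option Int × Nat :=
  l.foldl (fun pr v => if some v = pr.1 then (pr.1, pr.2 + 1) else (some v, 1)) (none, 0)

lemma pvTrail_concat (l : List Int) (x : Int) :
    pvTrail (l ++ [x]) =
      if some x = (pvTrail l).1 then ((pvTrail l).1, (pvTrail l).2 + 1) else (some x, 1) := by
  simp [pvTrail, List.foldl_append]

lemma drop_pred_singleton (l : List Int) (hl : l ≠ []) : ∃ y, l.drop (l.length - 1) = [y] := by
  cases hdl : l.drop (l.length - 1) with
  | nil =>
      have hlen := List.length_drop (l := l) (i := l.length - 1)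
      rw [hdl] at hlen
      have : l.length ≠ 0 := by simpa using hl
      simp at hlen
      omega
  | cons y ys =>
      have hlen := List.length_drop (l := l) (i := l.length - 1)
      rw [hdl] at hlen
      have : l.length ≠ 0 := by simpa using hl
      simp at hlen
      have : ys = [] := List.eq_nil_of_length_eq_zero (by omega)
      exact ⟨y, by rw [this]⟩

lemma pvTrail_inv (l : List Int) :
    (pvTrail l).1 = (l.drop (l.length - 1)).head? ∧
    (∀ v, (pvTrail l).1 = some v → 1 ≤ (pvTrail l).2) ∧
    (∀ v, (pvTrail l).1 = some v → (2 ≤ (pvTrail l).2 ↔ l.drop (l.length - 2) = [v, v])) := by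
  induction l using List.reverseRecOn with
  | nil => simp [pvTrail]
  | append_singleton l x ih =>
      obtain ⟨ih1, ih1', ih2⟩ := ih
      rw [pvTrail_concat]
      have hd1 : (l ++ [x]).drop ((l ++ [x]).length - 1) = [x] := by
        rw [show (l ++ [x]).length - 1 = l.length by simp]
        exact List.drop_left
      have hd2 : (l ++ [x]).drop ((l ++ [x]).length - 2) = l.drop (l.length - 1) ++ [x] := by
        rw [show (l ++ [x]).length - 2 = l.length - 1 by simp]
        rw [List.drop_append_of_le_length (by omega)]
      refine ⟨?_, ?_, ?_⟩
      · rw [hd1]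
        split_ifs with h
        · exact h.symm
        · rfl
      · intro v hv
        split_ifs at hv ⊢ <;> omega
      · intro v hv
        have hvx : v = x := by
          split_ifs at hv with h
          · rw [hv] at h
            exact (Option.some_inj.mp h).symm
          · exact (Option.some_inj.mp hv).symm
        subst hvx
        rw [hd2]
        split_ifs with h
        · -- prev = some v; LHS is 2 ≤ run+1, true since 1 ≤ run
          have h1 := ih1' v h.symm
          have hl : l ≠ [] := by
            intro he
            rw [he] at h
            simp [pvTrail] at h
          obtain ⟨y, hy⟩ := drop_pred_singleton l hl
          have hyx : y = v := by
            have := ih1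
            rw [hy] at this
            rw [← h] at this
            simpa using this.symm
          subst hyx
          simp only [hy]
          constructor
          · intro _; rfl
          · intro _; omega
        · -- run' = 1; both sides false
          simp only []
          constructor
          · intro hc; omega
          · intro hc
            exfalso
            have hdl : l.drop (l.length - 1) = [v] :=
              List.append_cancel_right (bs := [v]) (by simpa using hc)
            apply h
            rw [ih1, hdl]
            rfl

lemma trailStep_three (l : List Int) (x : Int) :
    3 ≤ (pvTrail (l ++ [x])).2 ↔ l.drop (l.length - 2) = [x, x] := by
  obtain ⟨ih1, ih1', ih2⟩ := pvTrail_inv l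
  rw [pvTrail_concat]
  split_ifs with h
  · simp only []
    rw [show (3 ≤ (pvTrail l).2 + 1) = (2 ≤ (pvTrail l).2) from propext (by omega)]
    exact ih2 x h.symm
  · simp only []
    constructor
    · intro hc; omega
    · intro hc
      exfalso
      have h2 : l.drop (l.length - 1) = [x] := by
        have : l.drop (l.length - 1) = (l.drop (l.length - 2)).drop 1 := by
          rw [List.drop_drop]
          congr 1
          have hlen := List.length_drop (l := l) (i := l.length - 2)
          rw [hc] at hlen
          simp at hlen
          omega
        rw [this, hc]
        rfl
      apply h
      rw [ih1, h2]
      rfl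

lemma firstT?_concat (t x : Int) (l : List Int) :
    firstT? t (l ++ [x]) =
      match firstT? t l with
      | some j => some j
      | none => if x = t ∧ l.drop (l.length - 2) = [t, t] then some (l.length - 2) else none := by
  induction l using firstT?.induct t with
  | case1 a b c r htrip =>
      simp [firstT?, htrip]
  | case2 a b c r htrip ih =>
      have hstep : firstT? t ((a :: b :: c :: r) ++ [x]) = (firstT? t ((b :: c :: r) ++ [x])).map (· + 1) := by
        simp only [List.cons_append]
        rw [show firstT? t (a :: b :: c :: (r ++ [x])) =
              if a = t ∧ b = t ∧ c = t then some 0 else (firstT? t (b :: c :: (r ++ [x]))).map (· + 1) from rfl]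
        simp [htrip]
      rw [hstep, ih]
      rw [show firstT? t (a :: b :: c :: r) =
            if a = t ∧ b = t ∧ c = t then some 0 else (firstT? t (b :: c :: r)).map (· + 1) from rfl]
      simp only [htrip, if_false]
      cases hf : firstT? t (b :: c :: r) with
      | some j => simp
      | none =>
          simp only [Option.map_none]
          have hdrop : (a :: b :: c :: r).drop ((a :: b :: c :: r).length - 2) =
              (b :: c :: r).drop ((b :: c :: r).length - 2) := by
            simp only [List.length_cons]
            rw [show r.length + 1 + 1 + 1 - 2 = (r.length + 1 + 1 - 2) + 1 by omega]
            rfl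
          rw [hdrop]
          split_ifs with hc
          · exact (by simp only [Option.map_some, List.length_cons]; exact congrArg some (by omega))
          · simp
  | case3 l hshort =>
      have hnone : firstT? t l = none := by
        cases l with
        | nil => rfl
        | cons a r =>
          cases r with
          | nil => rfl
          | cons b r' =>
            cases r' with
            | nil => rfl
            | cons c r'' => exact absurd rfl (by intro h; exact hshort a b c r'' h)
      rw [hnone]
      cases l with
      | nil => simp [firstT?]
      | cons a r =>
        cases r with
        | nil => simp [firstT?]
        | cons b r' =>
          cases r' with
          | nil =>
              simp only [List.cons_append, List.nil_append, List.length_cons, List.length_nil]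
              rw [show firstT? t [a, b, x] =
                    if a = t ∧ b = t ∧ x = t then some 0 else (firstT? t [b, x]).map (· + 1) from rfl]
              rw [show firstT? t [b, x] = none from rfl]
              simp only [Option.map_none]
              split_ifs with h1 h2 h2 <;> simp_all
          | cons c r'' => exact absurd rfl (by intro h; exact hshort a b c r'' h)

lemma mainInv (l : List Int) :
    (PySem.List.enumerate l 0).foldl pvStepB ((-1, -1), (none, 0)) =
      ((optInt (firstT? 0 l), optInt (firstT? 1 l)), pvTrail l) := by
  induction l using List.reverseRecOn with
  | nil => simp [PySem.List.enumerate, firstT?, optInt, pvTrail]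
  | append_singleton l x ih =>
      rw [PySem.List.enumerate_append, List.foldl_append, ih]
      rw [show PySem.List.enumerate [x] (0 + (l.length : Int)) = [((l.length : Int), x)] by
            simp [PySem.List.enumerate_cons, PySem.List.enumerate_nil]]
      simp only [List.foldl_cons, List.foldl_nil]
      rw [firstT?_concat 0 x l, firstT?_concat 1 x l]
      have hstep : (if some x = (pvTrail l).1 then ((pvTrail l).1, (pvTrail l).2 + 1) else (some x, 1)) = pvTrail (l ++ [x]) := (pvTrail_concat l x).symm
      simp only [pvStepB]
      rw [hstep]
      have hcast : 2 ≤ l.length → ((l.length - 2 : Nat) : Int) = (l.length : Int) - 2 := fun h => Int.natCast_sub h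
      by_cases h3 : 3 ≤ (pvTrail (l ++ [x])).2
      · have hxx : l.drop (l.length - 2) = [x, x] := (trailStep_three l x).mp h3
        have hlen2 : 2 ≤ l.length := by
          have := List.length_drop (l := l) (i := l.length - 2)
          rw [hxx] at this
          simp at this
          omega
        have hcast2 := hcast hlen2
        simp only [if_pos h3]
        rcases hf0 : firstT? 0 l with _ | j <;> rcases hf1 : firstT? 1 l with _ | j' <;>
          simp only [optInt, Option.elim] <;>
          split_ifs <;> simp_all
      · have hxx : ¬ (l.drop (l.length - 2) = [x, x]) := fun hc => h3 ((trailStep_three l x).mpr hc)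
        simp only [if_neg h3]
        rcases hf0 : firstT? 0 l with _ | j <;> rcases hf1 : firstT? 1 l with _ | j' <;>
          simp only [optInt, Option.elim] <;>
          split_ifs <;> simp_all

-- ===== VERDICT (by name: the statement is the Claim_ definition above) =====
theorem extract_true_positions_py_spec : Claim_equal_extract_true_positions_py := by
  intro td _dom hpre
  unfold Spec_extract_true_positions_py
  obtain ⟨l, hl⟩ := Option.isSome_iff_exists.mp hpre
  rw [extractA_eq l td hl]
  show _ = ((PySem.List.enumerate ((td.lookup "true_labels").getD []) 0).foldl pvStepB ((-1, -1), (none, 0))).1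
  rw [hl]
  simp [mainInv l]
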